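-- pv_equiv track=rewrite | github.com/kevinmarlis/Functional-Programming | F. Amuse-Bouche/Refactoring.py | doubleAndSum_2a2
-- ===== SOURCE A (Python) =====
-- from typing import List, Tuple
--
-- def doubleAndSum_2a2(xs: List[int]) -> int:
--     """
--     iteration with pattern matching in body
--     local variables: x0, x1, xs, total.
--     """
--     total = 0
--     while len(xs) >= 2:
--         (x0, x1, *xs) = xs
--         total += x0 + 2*x1
--     if len(xs) == 1:
--         total += xs[0]
--     return total
-- ===== SOURCE B (Python) =====
-- from typing import List
--
-- def doubleAndSum_2a2(xs: List[int]) -> int: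
--     # total of all elements, plus the odd-indexed elements once more
--     return sum(xs) + sum(xs[1::2])
-- ===== Notes on version B (the rewrite author's own statement) =====
-- stated objective: faster
-- what changed: Replaced the destructuring while-loop (whose (x0, x1, *xs) = xs copies the remaining list every iteration, making A quadratic) by two aggregate passes: the sum of the whole list plus the sum of the odd-index slice xs[1::2], using 2*x1 = x1 (in the full sum) + x1 (in the odd slice).
import Mathlib
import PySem

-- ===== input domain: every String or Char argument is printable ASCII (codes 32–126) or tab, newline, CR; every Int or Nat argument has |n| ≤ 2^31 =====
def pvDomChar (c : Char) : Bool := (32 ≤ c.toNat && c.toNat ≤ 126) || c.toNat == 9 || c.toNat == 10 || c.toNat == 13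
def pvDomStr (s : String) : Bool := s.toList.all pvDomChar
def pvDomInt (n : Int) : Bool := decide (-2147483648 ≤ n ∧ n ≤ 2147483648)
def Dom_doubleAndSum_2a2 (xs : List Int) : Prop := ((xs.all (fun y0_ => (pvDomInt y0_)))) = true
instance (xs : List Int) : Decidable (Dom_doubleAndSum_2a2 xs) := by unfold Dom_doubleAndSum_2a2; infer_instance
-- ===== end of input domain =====

-- B replaces A's pairwise destructuring loop (its (x0, x1, *xs) = xs copies the list each step) by sum(xs) + sum(xs[1::2]); a timing run measured B faster.

-- ===== PORT A =====
-- the while-loop: destructure two leading elements at a time, then the trailing one-element case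
def dasLoopA (total : Int) : List Int → Int
  | x0 :: x1 :: xs => dasLoopA (total + (x0 + 2 * x1)) xs
  | [x] => total + x          -- 'if len(xs) == 1: total += xs[0]'
  | [] => total

def doubleAndSum_2a2 (xs : List Int) : Int := dasLoopA 0 xs

-- ===== PORT B =====
def doubleAndSum_2a2_alt (xs : List Int) : Int :=
  xs.sum + ((PySem.List.slice? xs (some 1) none 2).getD []).sum

-- ===== PRECONDITION & SPEC =====
def Spec_doubleAndSum_2a2 (xs : List Int) (out : Int) : Prop := out = doubleAndSum_2a2_alt xs
instance (xs : List Int) (out : Int) : Decidable (Spec_doubleAndSum_2a2 xs out) := by unfold Spec_doubleAndSum_2a2; infer_instance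

-- ===== CLAIM (what is proved, stated in full; the proofs are below) =====
def Claim_equal_doubleAndSum_2a2 : Prop := ∀ (xs : List Int), Dom_doubleAndSum_2a2 xs → Spec_doubleAndSum_2a2 xs (doubleAndSum_2a2 xs)

-- ===== LEMMAS AND PROOFS =====

-- the odd-indexed elements, as a structural function used only by the proofs
def oddIdx : List Int → List Int
  | _ :: x1 :: xs => x1 :: oddIdx xs
  | _ => []

lemma odd_filterMap (xs : List Int) :
    List.filterMap (fun k : Nat => xs[((1 : Int) + 2 * (k : Int)).toNat]?) (List.range (xs.length / 2))
      = oddIdx xs := by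
  induction xs using oddIdx.induct with
  | case1 x0 x1 xs ih =>
    have hlen : (x0 :: x1 :: xs).length / 2 = xs.length / 2 + 1 := by
      simp [List.length_cons]; omega
    rw [hlen, List.range_succ_eq_map, List.filterMap_cons, List.filterMap_map]
    have h0 : ((1 : Int) + 2 * ((0 : Nat) : Int)).toNat = 1 := by decide
    have hfun : (fun k => (x0 :: x1 :: xs)[(1 + 2 * ((k : Nat) : Int)).toNat]?) ∘ Nat.succ
        = (fun k : Nat => xs[(1 + 2 * (k : Int)).toNat]?) := by
      funext k
      have h1 : ((1 : Int) + 2 * ((Nat.succ k : Nat) : Int)).toNat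
          = ((1 + 2 * (k : Int)).toNat + 1) + 1 := by
        push_cast; omega
      simp only [Function.comp, h1, List.getElem?_cons_succ]
    rw [hfun, ih]
    simp [oddIdx]
  | case2 xs h =>
    have : xs.length / 2 = 0 := by
      match xs, h with
      | [], _ => simp
      | [x], _ => simp
      | x0 :: x1 :: r, h => exact absurd rfl (h x0 x1 r)
    rw [this]
    match xs, h with
    | [], _ => simp [oddIdx]
    | [x], _ => simp [oddIdx]
    | x0 :: x1 :: r, h => exact absurd rfl (h x0 x1 r)

lemma slice_odd (xs : List Int) :
    (PySem.List.slice? xs (some 1) none 2).getD [] = oddIdx xs := by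
  rw [← odd_filterMap]
  rcases xs with _ | ⟨x, xs⟩
  · simp [PySem.List.slice?, PySem.List.sliceIndices]
  rcases xs with _ | ⟨y, ys⟩
  · simp [PySem.List.slice?, PySem.List.sliceIndices]
  have hlen : (1:Int) < ((x :: y :: ys).length : Int) := by simp [List.length_cons]
  have hmin : min (1 : Int) ((x :: y :: ys).length : Int) = 1 := by omega
  simp only [PySem.List.slice?, PySem.List.sliceIndices]
  norm_num [hmin, hlen]
  congr 1
  · funext k
    rw [show min (1:Int) ((ys.length : Int) + 1 + 1) = 1 from by omega]
  · have harg : (((ys.length:Int) + 1 + 1 - min 1 ((ys.length:Int) + 1 + 1) + 2 - 1) / 2).toNat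
        = (ys.length + 1 + 1) / 2 := by omega
    rw [harg]

lemma dasLoopA_eq (total : Int) (xs : List Int) :
    dasLoopA total xs = total + xs.sum + (oddIdx xs).sum := by
  induction xs using oddIdx.induct generalizing total with
  | case1 x0 x1 xs ih => simp [dasLoopA, oddIdx, ih]; ring
  | case2 xs h =>
    match xs, h with
    | [], _ => simp [dasLoopA, oddIdx]
    | [x], _ => simp [dasLoopA, oddIdx]
    | x0 :: x1 :: r, h => exact absurd rfl (h x0 x1 r)

-- ===== VERDICT (by name: the statement is the Claim_ definition above) =====
theorem doubleAndSum_2a2_spec : Claim_equal_doubleAndSum_2a2 := by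
  intro xs _
  show doubleAndSum_2a2 xs = doubleAndSum_2a2_alt xs
  rw [doubleAndSum_2a2, doubleAndSum_2a2_alt, dasLoopA_eq, slice_odd]
  ring
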